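-- pv_equiv track=rewrite | github.com/scottonanski/persistent-mind-model-v1.0 | pmm/utils/parsers.py | _extract_until_punctuation
-- ===== SOURCE A (Python) =====
-- def _extract_until_punctuation(text: str) -> str:
--     """Extract text until punctuation or quote."""
--     if not text:
--         return ""
--
--     result = []
--     for char in text:
--         if char in ".,;!?\"'":
--             break
--         result.append(char)
--
--     return "".join(result).strip()
-- ===== SOURCE B (Python) =====
-- import re
--
-- _PREFIX_RE = re.compile(r"[^.,;!?\"']*")
--
--
-- def _extract_until_punctuation(text: str) -> str:
--     """Extract text until punctuation or quote."""
--     return _PREFIX_RE.match(text).group().strip()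
-- ===== Notes on version B (the rewrite author's own statement) =====
-- stated objective: idiomatic
-- what changed: Replaced the explicit per-character loop with accumulator list and break by a single precompiled regex match of a negated character class that yields the maximal punctuation-free prefix directly (the scan runs in C inside the regex engine instead of the Python bytecode loop).
import Mathlib
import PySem

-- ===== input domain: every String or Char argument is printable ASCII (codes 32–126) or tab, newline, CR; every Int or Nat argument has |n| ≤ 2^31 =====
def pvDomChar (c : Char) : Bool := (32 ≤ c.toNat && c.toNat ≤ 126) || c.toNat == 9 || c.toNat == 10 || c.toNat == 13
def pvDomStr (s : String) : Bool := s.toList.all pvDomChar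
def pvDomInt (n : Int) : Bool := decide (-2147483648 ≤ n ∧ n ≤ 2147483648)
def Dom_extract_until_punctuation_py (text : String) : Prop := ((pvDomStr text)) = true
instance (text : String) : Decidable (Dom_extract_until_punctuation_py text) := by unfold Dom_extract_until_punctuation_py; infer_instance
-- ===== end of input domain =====

-- B replaces A's explicit scan loop (accumulator + break) with a single regex match
-- of the negated character class [^.,;!?"']* (maximal punctuation-free prefix), for idiomatic brevity.

-- ===== PORT A =====
-- the Python loop `for char in text: if char in ".,;!?\"'": break; result.append(char)`,
-- transcribed as structural recursion carrying the accumulated prefix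
def pvLoopA : List Char → List Char
  | [] => []
  | c :: rest => if (".,;!?\"'".toList.contains c) then [] else c :: pvLoopA rest

def extract_until_punctuation_py (text : String) : String :=
  if text = "" then ""
  else PySem.Str.strip (String.ofList (pvLoopA text.toList))  -- "".join(result).strip()

-- ===== PORT B =====
-- the regex [^.,;!?"']* matches the maximal prefix of characters outside the class:
-- ported as takeWhile on the characters (exact for this *-quantified negated class), then .strip()
def extract_until_punctuation_py_alt (text : String) : String :=
  PySem.Str.strip (String.ofList (text.toList.takeWhile (fun c => !(".,;!?\"'".toList.contains c))))

-- ===== PRECONDITION & SPEC =====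
def Spec_extract_until_punctuation_py (text : String) (out : String) : Prop := out = extract_until_punctuation_py_alt text
instance (text : String) (out : String) : Decidable (Spec_extract_until_punctuation_py text out) := by unfold Spec_extract_until_punctuation_py; infer_instance

-- ===== CLAIM (what is proved, stated in full; the proofs are below) =====
def Claim_equal_extract_until_punctuation_py : Prop := ∀ (text : String), Dom_extract_until_punctuation_py text → Spec_extract_until_punctuation_py text (extract_until_punctuation_py text)

-- ===== LEMMAS AND PROOFS =====

theorem pvLoopA_eq_takeWhile (cs : List Char) :
    pvLoopA cs = cs.takeWhile (fun c => !(".,;!?\"'".toList.contains c)) := by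
  induction cs with
  | nil => rfl
  | cons c rest ih =>
    by_cases h : (".,;!?\"'".toList.contains c) = true
    · simp [pvLoopA, List.takeWhile_cons, List.contains_eq_mem] at h ⊢
      simp [h]
      tauto
    · simp [pvLoopA, List.takeWhile_cons, List.contains_eq_mem] at h ⊢
      simp [h, ih, List.contains_eq_mem]

-- ===== VERDICT (by name: the statement is the Claim_ definition above) =====
theorem extract_until_punctuation_py_spec : Claim_equal_extract_until_punctuation_py := by
  intro text _
  unfold Spec_extract_until_punctuation_py extract_until_punctuation_py extract_until_punctuation_py_alt
  by_cases h : text = ""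
  · subst h; decide
  · rw [if_neg h, pvLoopA_eq_takeWhile]
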